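-- pv_equiv track=rewrite | github.com/PowerDNS/pdns | pdns/dnsdistdist/actions-generator.py | type_to_cpp
-- ===== SOURCE A (Python) =====
-- def is_vector_of(type_str):
--     return type_str.startswith('Vec<')
--
-- def type_to_cpp(type_str, lua_interface, inside_container=False):
--     if is_vector_of(type_str):
--         sub_type = type_str[4:-1]
--         return 'std::vector<' + type_to_cpp(sub_type, lua_interface, True) + '>'
--
--     if type_str == 'u8':
--         return 'uint8_t'
--     if type_str == 'u16':
--         return 'uint16_t'
--     if type_str == 'u32':
--         return 'uint32_t'
--     if type_str == 'u64':
--         return 'uint64_t'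
--     if type_str == 'f64':
--         return 'double'
--     if type_str == 'String':
--         if lua_interface:
--             return 'std::string'
--         if inside_container:
--             return 'std::string'
--         return 'const std::string&'
--     return type_str
-- ===== SOURCE B (Python) =====
-- def type_to_cpp(type_str, lua_interface, inside_container=False):
--     # peel 'Vec<...>' wrappers iteratively instead of recursing
--     d = 0
--     core = type_str
--     while core.startswith('Vec<'):
--         core = core[4:-1]
--         d += 1
--     if core == 'String':
--         out = 'std::string' if (lua_interface or inside_container or d > 0) else 'const std::string&'
--     else:
--         out = {'u8': 'uint8_t', 'u16': 'uint16_t', 'u32': 'uint32_t',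
--                'u64': 'uint64_t', 'f64': 'double'}.get(core, core)
--     for _ in range(d):
--         out = 'std::vector<' + out + '>'
--     return out
-- ===== Notes on version B (the rewrite author's own statement) =====
-- stated objective: alternative
-- what changed: Replaced the recursive descent over nested Vec<...> with an iterative prefix-peeling loop that counts the depth, a dict lookup for the base token (with inside_container derived from depth>0), and a loop wrapping the result in std::vector<...> depth times.
import Mathlib
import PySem

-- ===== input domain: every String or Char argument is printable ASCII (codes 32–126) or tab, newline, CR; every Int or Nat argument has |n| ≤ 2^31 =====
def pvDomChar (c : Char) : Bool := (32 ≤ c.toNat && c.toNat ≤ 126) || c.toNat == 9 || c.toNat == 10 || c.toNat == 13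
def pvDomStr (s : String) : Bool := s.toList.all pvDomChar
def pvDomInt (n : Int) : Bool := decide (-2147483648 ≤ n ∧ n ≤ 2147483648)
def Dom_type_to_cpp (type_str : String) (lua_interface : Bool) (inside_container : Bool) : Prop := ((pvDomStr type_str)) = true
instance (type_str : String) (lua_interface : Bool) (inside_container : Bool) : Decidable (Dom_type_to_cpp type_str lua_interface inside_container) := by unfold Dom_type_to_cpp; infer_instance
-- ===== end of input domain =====

-- B replaces A's recursive descent over nested 'Vec<…>' by an iterative peel-count-wrap decomposition; same cost, no speed claim.

-- needed by both ports' termination proofs: peeling 'Vec<…>' strictly shrinks the token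
theorem pvSub_lt (cs : List Char) (h : PySem.Chars.startswith cs "Vec<".toList = true) :
    ((cs.drop 4).dropLast).length < cs.length := by
  have h4 : 4 ≤ cs.length := by
    have := (PySem.Chars.startswith_iff cs "Vec<".toList).mp h
    simpa using this.length_le
  simp only [List.length_dropLast, List.length_drop]
  omega

-- ===== PORT A =====
-- Python's type_str[4:-1] is exactly (drop 4).dropLast on the code points (indices 4 .. len-2);
-- written that way so the structural recursion terminates on list length.
def pvTcA (cs : List Char) (lua_interface : Bool) (inside_container : Bool) : List Char :=
  if h : PySem.Chars.startswith cs "Vec<".toList then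
    "std::vector<".toList ++ pvTcA ((cs.drop 4).dropLast) lua_interface true ++ ['>']
  else if cs = "u8".toList then "uint8_t".toList
  else if cs = "u16".toList then "uint16_t".toList
  else if cs = "u32".toList then "uint32_t".toList
  else if cs = "u64".toList then "uint64_t".toList
  else if cs = "f64".toList then "double".toList
  else if cs = "String".toList then
    if lua_interface then "std::string".toList
    else if inside_container then "std::string".toList
    else "const std::string&".toList
  else cs
termination_by cs.length
decreasing_by exact pvSub_lt cs h

def type_to_cpp (type_str : String) (lua_interface : Bool) (inside_container : Bool) : String :=
  String.ofList (pvTcA type_str.toList lua_interface inside_container)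

-- ===== PORT B =====
-- while core.startswith('Vec<'): core = core[4:-1]; d += 1   (core[4:-1] = (drop 4).dropLast, as above)
def pvPeel (cs : List Char) (d : Nat) : List Char × Nat :=
  if h : PySem.Chars.startswith cs "Vec<".toList then
    pvPeel ((cs.drop 4).dropLast) (d + 1)
  else (cs, d)
termination_by cs.length
decreasing_by exact pvSub_lt cs h

-- the base-token translation: {'u8': …}.get(core, core) with 'String' special-cased first
def pvBase (core : List Char) (lua_interface : Bool) (inside : Bool) : List Char :=
  if core = "String".toList then
    if lua_interface || inside then "std::string".toList else "const std::string&".toList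
  else
    (List.lookup core
      [("u8".toList, "uint8_t".toList), ("u16".toList, "uint16_t".toList),
       ("u32".toList, "uint32_t".toList), ("u64".toList, "uint64_t".toList),
       ("f64".toList, "double".toList)]).getD core

-- for _ in range(d): out = 'std::vector<' + out + '>'
def pvWrap : Nat → List Char → List Char
  | 0, t => t
  | n + 1, t => "std::vector<".toList ++ pvWrap n t ++ ['>']

def type_to_cpp_alt (type_str : String) (lua_interface : Bool) (inside_container : Bool) : String :=
  let p := pvPeel type_str.toList 0
  String.ofList (pvWrap p.2 (pvBase p.1 lua_interface (inside_container || decide (0 < p.2))))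

-- ===== PRECONDITION & SPEC =====
def Spec_type_to_cpp (type_str : String) (lua_interface : Bool) (inside_container : Bool) (out : String) : Prop := out = type_to_cpp_alt type_str lua_interface inside_container
instance (type_str : String) (lua_interface : Bool) (inside_container : Bool) (out : String) : Decidable (Spec_type_to_cpp type_str lua_interface inside_container out) := by unfold Spec_type_to_cpp; infer_instance

-- ===== CLAIM (what is proved, stated in full; the proofs are below) =====
def Claim_equal_type_to_cpp : Prop := ∀ (type_str : String) (lua_interface : Bool) (inside_container : Bool), Dom_type_to_cpp type_str lua_interface inside_container → Spec_type_to_cpp type_str lua_interface inside_container (type_to_cpp type_str lua_interface inside_container)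

-- ===== LEMMAS AND PROOFS =====

-- peeling with an arbitrary counter just shifts the counter
theorem pvPeel_shift : ∀ (n : Nat) (cs : List Char), cs.length ≤ n → ∀ (d : Nat),
    pvPeel cs d = ((pvPeel cs 0).1, d + (pvPeel cs 0).2) := by
  intro n
  induction n with
  | zero =>
      intro cs hl d
      have hnil : cs = [] := List.eq_nil_of_length_eq_zero (Nat.le_zero.mp hl)
      subst hnil
      have hsw : PySem.Chars.startswith ([] : List Char) ['V', 'e', 'c', '<'] = false := by decide
      conv_lhs => rw [pvPeel]
      conv_rhs => rw [pvPeel]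
      simp [hsw]
  | succ n ih =>
      intro cs hl d
      by_cases h : PySem.Chars.startswith cs "Vec<".toList = true
      · have hlt := pvSub_lt cs h
        conv_lhs => rw [pvPeel]
        conv_rhs => rw [pvPeel]
        rw [dif_pos h, dif_pos h, ih _ (by omega) (d + 1), ih _ (by omega) 1]
        simp
        omega
      · conv_lhs => rw [pvPeel]
        conv_rhs => rw [pvPeel]
        rw [dif_neg h, dif_neg h]
        simp

-- on a non-Vec token, A's if-chain computes B's base translation
theorem pvBase_eq (cs : List Char) (lua ic : Bool) :
    (if cs = "u8".toList then "uint8_t".toList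
     else if cs = "u16".toList then "uint16_t".toList
     else if cs = "u32".toList then "uint32_t".toList
     else if cs = "u64".toList then "uint64_t".toList
     else if cs = "f64".toList then "double".toList
     else if cs = "String".toList then
       if lua then "std::string".toList
       else if ic then "std::string".toList
       else "const std::string&".toList
     else cs) = pvBase cs lua ic := by
  unfold pvBase
  split_ifs <;> try simp_all [List.lookup]
  all_goals {
    have e1 : (cs == ['u', '8']) = false := by simp_all
    have e2 : (cs == ['u', '1', '6']) = false := by simp_all
    have e3 : (cs == ['u', '3', '2']) = false := by simp_all
    have e4 : (cs == ['u', '6', '4']) = false := by simp_all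
    have e5 : (cs == ['f', '6', '4']) = false := by simp_all
    simp only [e1, e2, e3, e4, e5, Option.getD]
  }

-- the heart of the equivalence: A's recursion = peel, translate base, wrap depth times
theorem pv_main : ∀ (n : Nat) (cs : List Char), cs.length ≤ n → ∀ (lua ic : Bool),
    pvTcA cs lua ic =
      pvWrap (pvPeel cs 0).2
        (pvBase (pvPeel cs 0).1 lua (ic || decide (0 < (pvPeel cs 0).2))) := by
  intro n
  induction n with
  | zero =>
      intro cs hl lua ic
      have hnil : cs = [] := List.eq_nil_of_length_eq_zero (Nat.le_zero.mp hl)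
      subst hnil
      have hsw : PySem.Chars.startswith ([] : List Char) ['V', 'e', 'c', '<'] = false := by decide
      conv_lhs => rw [pvTcA]
      conv_rhs => rw [pvPeel]
      rw [← pvBase_eq]
      simp [hsw, pvWrap]
  | succ n ih =>
      intro cs hl lua ic
      by_cases h : PySem.Chars.startswith cs "Vec<".toList = true
      · have hlt := pvSub_lt cs h
        conv_lhs => rw [pvTcA]
        conv_rhs => rw [pvPeel]
        rw [dif_pos h, dif_pos h,
            pvPeel_shift cs.length _ (by omega) 1,
            ih _ (by omega) lua true]
        simp [pvWrap, Nat.add_comm 1]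
      · conv_lhs => rw [pvTcA]
        conv_rhs => rw [pvPeel]
        rw [dif_neg h, dif_neg h, ← pvBase_eq]
        simp [pvWrap]

-- ===== VERDICT (by name: the statement is the Claim_ definition above) =====
theorem type_to_cpp_spec : Claim_equal_type_to_cpp := by
  intro s lua ic _
  unfold Spec_type_to_cpp type_to_cpp type_to_cpp_alt
  rw [pv_main s.toList.length s.toList (le_refl _) lua ic]
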